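-- pv_equiv track=rewrite | github.com/petify-inout/petify-backend | petapp/data_preprocess_util.py | iniData
-- ===== SOURCE A (Python) =====
-- def iniData(symp_list,csv_reader):
--     temp_matrix = []
--     disease_index = []
--     for line in csv_reader:
--         disease_index.append(line[0])
--         temp_line = line[1:]
--         temp_row = dataArrange(symp_list,temp_line)
--         temp_matrix.append(temp_row)
--     return temp_matrix,disease_index
--
-- def dataArrange(symp_list,data_list):
--     temp_row= [0]*len(symp_list)
--     for i in symp_list:
--         for j in data_list:
--             if(i == j):
--                 t = symp_list.index(i)
--                 temp_row[t] = 1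
--                 break
--     return temp_row
-- ===== SOURCE B (Python) =====
-- def iniData(symp_list, csv_reader):
--     idx = {}
--     for k, s in enumerate(symp_list):
--         if s not in idx:
--             idx[s] = k
--     n = len(symp_list)
--     temp_matrix = []
--     disease_index = []
--     for line in csv_reader:
--         disease_index.append(line[0])
--         row = [0] * n
--         for j in line[1:]:
--             if j in idx:
--                 row[idx[j]] = 1
--         temp_matrix.append(row)
--     return temp_matrix, disease_index
-- ===== Notes on version B (the rewrite author's own statement) =====
-- stated objective: faster
-- what changed: Replaces the per-row nested scan over all symptoms with repeated list.index calls by a first-index dict built once over symp_list, then marking only the symptoms actually present in each row.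
import Mathlib
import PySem

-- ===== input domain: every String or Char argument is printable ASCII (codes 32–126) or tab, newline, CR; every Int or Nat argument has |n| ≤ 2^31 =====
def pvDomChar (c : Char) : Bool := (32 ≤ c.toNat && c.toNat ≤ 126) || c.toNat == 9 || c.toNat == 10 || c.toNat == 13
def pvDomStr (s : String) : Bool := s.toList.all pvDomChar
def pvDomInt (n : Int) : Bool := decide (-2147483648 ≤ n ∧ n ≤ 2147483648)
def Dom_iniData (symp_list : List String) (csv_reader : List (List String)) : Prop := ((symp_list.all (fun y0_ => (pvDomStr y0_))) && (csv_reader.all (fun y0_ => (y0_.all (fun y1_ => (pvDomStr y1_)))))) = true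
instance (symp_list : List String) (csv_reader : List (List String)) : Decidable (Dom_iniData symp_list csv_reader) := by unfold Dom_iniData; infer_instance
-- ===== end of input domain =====

-- B builds a first-index dict over symp_list once and marks only the symptoms present in each row,
-- replacing A's per-row nested scan with repeated list.index calls (objective: faster).

-- ===== PORT A =====
-- inner 'for j in data_list: if i == j: temp_row[symp_list.index(i)] = 1; break'
def pvInnerA (symp_list : List String) (i : String) (row : List Int) : List String → List Int
  | [] => row
  | j :: rest =>
      if i == j then
        match PySem.List.index? symp_list i with
        | some t => row.set t 1
        | none => row        -- unreachable: i is drawn from symp_list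
      else pvInnerA symp_list i row rest

def pvDataArrange (symp_list : List String) (data_list : List String) : List Int :=
  symp_list.foldl (fun row i => pvInnerA symp_list i row data_list)
    (List.replicate symp_list.length (0 : Int))

def iniData (symp_list : List String) (csv_reader : List (List String)) : List (List Int) × List String :=
  let r := csv_reader.foldl
    (fun (acc : List (List Int) × List String) line =>
      (acc.1 ++ [pvDataArrange symp_list (PySem.List.slice line (some 1) none)],
       acc.2 ++ [(PySem.List.pyGet? line 0).getD ""]))   -- line[0]; Pre_ excludes the empty-line IndexError
    ([], [])
  r

-- ===== PORT B =====
-- idx = {}; for k, s in enumerate(symp_list): if s not in idx: idx[s] = k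
def pvBuildIdx (symp_list : List String) : PySem.Dict String Int :=
  (PySem.List.enumerate symp_list 0).foldl
    (fun d p => if d.contains p.2 then d else d.insert p.2 p.1) PySem.Dict.empty

-- row = [0]*n; for j in data: if j in idx: row[idx[j]] = 1
def pvRowB (idx : PySem.Dict String Int) (n : Nat) (data : List String) : List Int :=
  data.foldl
    (fun row j =>
      match idx.get? j with
      | some t => row.set t.toNat 1
      | none => row)
    (List.replicate n (0 : Int))

def iniData_alt (symp_list : List String) (csv_reader : List (List String)) : List (List Int) × List String :=
  let idx := pvBuildIdx symp_list
  let n := symp_list.length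
  csv_reader.foldl
    (fun (acc : List (List Int) × List String) line =>
      (acc.1 ++ [pvRowB idx n (PySem.List.slice line (some 1) none)],
       acc.2 ++ [(PySem.List.pyGet? line 0).getD ""]))
    ([], [])

-- ===== PRECONDITION & SPEC =====
-- Pre_ excludes rows that are empty lists: there line[0] raises IndexError in A (and in B alike).
def Pre_iniData (symp_list : List String) (csv_reader : List (List String)) : Prop :=
  ∀ line ∈ csv_reader, line ≠ []
instance (symp_list : List String) (csv_reader : List (List String)) : Decidable (Pre_iniData symp_list csv_reader) := by unfold Pre_iniData; infer_instance

def pvWitness_iniData : List String × List (List String) :=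
  (["fever", "cough"], [["flu", "fever"], ["cold", "cough", "fever"]])

def Spec_iniData (symp_list : List String) (csv_reader : List (List String)) (out : List (List Int) × List String) : Prop := out = iniData_alt symp_list csv_reader
instance (symp_list : List String) (csv_reader : List (List String)) (out : List (List Int) × List String) : Decidable (Spec_iniData symp_list csv_reader out) := by unfold Spec_iniData; infer_instance

-- ===== CLAIM (what is proved, stated in full; the proofs are below) =====
def Claim_equal_iniData : Prop := ∀ (symp_list : List String) (csv_reader : List (List String)), Dom_iniData symp_list csv_reader → Pre_iniData symp_list csv_reader → Spec_iniData symp_list csv_reader (iniData symp_list csv_reader)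

-- ===== LEMMAS AND PROOFS =====

-- marking a list of indices with 1
def pvMark (ts : List Nat) (row : List Int) : List Int :=
  ts.foldl (fun r t => r.set t 1) row

lemma pvMark_getElem? (ts : List Nat) (row : List Int) (k : Nat) :
    (pvMark ts row)[k]? = if k ∈ ts ∧ k < row.length then some 1 else row[k]? := by
  induction ts generalizing row with
  | nil => simp [pvMark]
  | cons t ts ih =>
      simp only [pvMark, List.foldl_cons] at *
      rw [ih]
      simp only [List.length_set, List.getElem?_set, List.mem_cons]
      by_cases hk : k < row.length
      · by_cases heq : t = k
        · by_cases hm : k ∈ ts <;> simp [heq, hm, hk]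
        · have hne : ¬ k = t := fun h => heq h.symm
          by_cases hm : k ∈ ts <;> simp [hm, hk, heq, hne]
      · have hnone : row[k]? = none := List.getElem?_eq_none (by omega)
        by_cases heq : t = k <;> simp [hk, heq, hnone]

lemma pvMark_congr (ts ts' : List Nat) (row : List Int)
    (h : ∀ k, k ∈ ts ↔ k ∈ ts') : pvMark ts row = pvMark ts' row := by
  apply List.ext_getElem?
  intro k
  rw [pvMark_getElem?, pvMark_getElem?]
  simp [h k]

-- a fold that optionally sets one index per element is pvMark of a filterMap
lemma pvFold_filterMap {α : Type} (f : α → Option Nat) (l : List α) (row : List Int) :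
    l.foldl (fun r x => match f x with | some t => r.set t 1 | none => r) row
      = pvMark (l.filterMap f) row := by
  induction l generalizing row with
  | nil => rfl
  | cons x xs ih =>
      simp only [List.foldl_cons, List.filterMap_cons]
      cases hfx : f x <;> simp [ih, pvMark]

-- break semantics of A's inner loop
lemma pvInnerA_eq (symp_list : List String) (i : String) (row : List Int) (data : List String) :
    pvInnerA symp_list i row data
      = match (if i ∈ data then PySem.List.index? symp_list i else none) with
        | some t => row.set t 1
        | none => row := by
  induction data with
  | nil => simp [pvInnerA]
  | cons j rest ih =>
      by_cases h : i = j
      · subst h; simp [pvInnerA]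
      · simp only [pvInnerA, beq_iff_eq, if_neg h, ih, List.mem_cons]
        simp [h]

-- the first-index dict: lookup is list.index
lemma pvBuildIdx_go (symp : List String) (k : Int) (d : PySem.Dict String Int) (s : String) :
    ((PySem.List.enumerate symp k).foldl
        (fun d p => if d.contains p.2 then d else d.insert p.2 p.1) d).get? s
      = if d.contains s then d.get? s
        else (PySem.List.index? symp s).map (fun t => k + (t : Int)) := by
  induction symp generalizing k d with
  | nil =>
      simp only [PySem.List.enumerate_nil, List.foldl_nil]
      by_cases hc : d.contains s
      · simp [hc]
      · have hget : d.get? s = none :=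
          (PySem.Dict.get?_eq_none_iff_contains d s).mpr (by revert hc; cases d.contains s <;> simp)
        simp [hc, hget, PySem.List.index?_eq_idxOf?]
  | cons x xs ih =>
      rw [PySem.List.enumerate_cons]
      simp only [List.foldl_cons]
      by_cases hsx : s = x
      · subst hsx
        rw [PySem.List.index?_cons_self]
        by_cases hc : d.contains s
        · rw [if_pos hc, ih, if_pos hc, if_pos hc]
        · rw [if_neg hc, ih, if_pos (PySem.Dict.contains_insert_self d s k), if_neg hc]
          simp [PySem.Dict.get?_insert_self]
      · have hne : s ≠ x := hsx
        rw [PySem.List.index?_cons_of_ne xs (Ne.symm hne)]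
        by_cases hc : d.contains s
        · by_cases hcx : d.contains x
          · rw [if_pos hcx, ih, if_pos hc, if_pos hc]
          · rw [if_neg hcx, ih]
            have hcs : (d.insert x k).contains s = true := by
              rw [PySem.Dict.contains_insert]; simp [hc]
            rw [if_pos hcs, if_pos hc, PySem.Dict.get?_insert_of_ne d k hne]
        · by_cases hcx : d.contains x
          · rw [if_pos hcx, ih, if_neg hc, if_neg hc]
            cases PySem.List.index? xs s <;> simp
            ring
          · rw [if_neg hcx, ih]
            have hcs : (d.insert x k).contains s = false := by
              rw [PySem.Dict.contains_insert]
              simp [hsx]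
              revert hc; cases d.contains s <;> simp
            rw [if_neg (by simp [hcs]), if_neg hc]
            cases PySem.List.index? xs s <;> simp
            ring

lemma pvBuildIdx_get? (symp : List String) (s : String) :
    (pvBuildIdx symp).get? s = (PySem.List.index? symp s).map (fun t => (t : Int)) := by
  rw [pvBuildIdx, pvBuildIdx_go]
  rw [if_neg (by simp [PySem.Dict.contains_empty])]
  cases PySem.List.index? symp s <;> simp

-- the rows agree
lemma pvRow_eq (symp data : List String) :
    pvDataArrange symp data = pvRowB (pvBuildIdx symp) symp.length data := by
  have hA : pvDataArrange symp data
      = pvMark (symp.filterMap (fun i => if i ∈ data then PySem.List.index? symp i else none))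
          (List.replicate symp.length (0 : Int)) := by
    rw [pvDataArrange]
    rw [show (fun (row : List Int) i => pvInnerA symp i row data)
        = (fun (r : List Int) x =>
            match (if x ∈ data then PySem.List.index? symp x else none) with
            | some t => r.set t 1 | none => r) from funext fun r => funext fun i => pvInnerA_eq symp i r data]
    exact pvFold_filterMap _ _ _
  have hB : pvRowB (pvBuildIdx symp) symp.length data
      = pvMark (data.filterMap (fun j => PySem.List.index? symp j))
          (List.replicate symp.length (0 : Int)) := by
    rw [pvRowB]
    have hstep : (fun (row : List Int) j =>
        match (pvBuildIdx symp).get? j with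
        | some t => row.set t.toNat 1 | none => row)
        = (fun (r : List Int) x =>
            match PySem.List.index? symp x with
            | some t => r.set t 1 | none => r) := by
      funext r j
      rw [pvBuildIdx_get?]
      cases PySem.List.index? symp j <;> simp
    rw [hstep]
    exact pvFold_filterMap _ _ _
  rw [hA, hB]
  apply pvMark_congr
  intro k
  simp only [List.mem_filterMap]
  constructor
  · rintro ⟨i, hi, h⟩
    by_cases hmem : i ∈ data
    · simp only [hmem, if_true] at h; exact ⟨i, hmem, h⟩
    · simp [hmem] at h
  · rintro ⟨j, hj, h⟩
    have hjm : j ∈ symp := (PySem.List.index?_isSome_iff symp j).mp (by rw [h]; rfl)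
    refine ⟨j, hjm, ?_⟩
    rw [if_pos hj]; exact h

-- ===== VERDICT (by name: the statement is the Claim_ definition above) =====
theorem iniData_spec : Claim_equal_iniData := by
  intro symp_list csv_reader _ _
  unfold Spec_iniData iniData iniData_alt
  have hstep : (fun (acc : List (List Int) × List String) line =>
      (acc.1 ++ [pvDataArrange symp_list (PySem.List.slice line (some 1) none)],
       acc.2 ++ [(PySem.List.pyGet? line 0).getD ""]))
      = (fun (acc : List (List Int) × List String) line =>
      (acc.1 ++ [pvRowB (pvBuildIdx symp_list) symp_list.length (PySem.List.slice line (some 1) none)],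
       acc.2 ++ [(PySem.List.pyGet? line 0).getD ""])) := by
    funext acc line
    rw [pvRow_eq]
  simp only [hstep]
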